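-- pv_equiv track=rewrite | github.com/mkuchnik/PlumberApp | microbenchmarks/simple_gnmt/graph_rewrites_patch.py | remap_dataset_names
-- ===== SOURCE A (Python) =====
-- def remap_dataset_names(topo_dataset_names):
--     remapper = dict()
--     remapper_counter = dict()
--     for n in topo_dataset_names:
--         if "/" in n:
--             base = n.split("/")[0]
--         else:
--             base = n
--         if base in remapper_counter:
--             remapper_counter[base] += 1
--         else:
--             remapper_counter[base] = 0
--         new_name = "{}_{}".format(base, remapper_counter[base])
--         remapper[n] = new_name
--     return remapper
-- ===== SOURCE B (Python) =====
-- def remap_dataset_names(topo_dataset_names):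
--     # Two-phase grouping decomposition: first group positions by base name,
--     # then assign each position its rank within its group, and finally build
--     # the mapping in the original encounter order (duplicates still last-wins).
--     bases = [n.split("/")[0] for n in topo_dataset_names]
--     groups = {}
--     for i, b in enumerate(bases):
--         groups.setdefault(b, []).append(i)
--     suffix = {}
--     for b, idxs in groups.items():
--         for j, i in enumerate(idxs):
--             suffix[i] = "{}_{}".format(b, j)
--     return {n: suffix[i] for i, n in enumerate(topo_dataset_names)}
-- ===== Notes on version B (the rewrite author's own statement) =====
-- stated objective: alternative
-- what changed: Replaces A's single pass with a running counter dict and membership branch by a two-phase grouping decomposition: positions are first grouped by base name, each position then gets its rank within its group, and the result is assembled in the original encounter order; the redundant '/'-containment test is dropped since split('/')[0] already covers it.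
import Mathlib
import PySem

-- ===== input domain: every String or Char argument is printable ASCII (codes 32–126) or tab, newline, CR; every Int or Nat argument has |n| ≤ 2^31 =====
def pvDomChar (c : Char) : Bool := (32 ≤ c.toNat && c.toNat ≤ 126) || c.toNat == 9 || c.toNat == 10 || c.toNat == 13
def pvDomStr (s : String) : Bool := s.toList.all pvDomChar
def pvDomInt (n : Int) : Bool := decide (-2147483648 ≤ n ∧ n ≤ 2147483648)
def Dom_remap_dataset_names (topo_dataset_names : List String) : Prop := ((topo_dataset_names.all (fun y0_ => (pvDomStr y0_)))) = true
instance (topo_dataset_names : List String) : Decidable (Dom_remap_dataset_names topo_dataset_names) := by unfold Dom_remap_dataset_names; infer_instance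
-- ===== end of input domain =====

-- ===== PORT A =====
-- B replaces A's single pass with a running counter dict by a two-phase grouping
-- decomposition: group positions by base, rank inside each group, then build the
-- result in encounter order (objective: alternative; same values, same item order).
-- step of A's loop: state = (remapper, remapper_counter)
def remapStepA (st : PySem.Dict String String × PySem.Dict String Int) (n : String) :
    PySem.Dict String String × PySem.Dict String Int :=
  let base := if PySem.Str.isIn "/" n
    then ((PySem.Chars.splitOn n.toList "/".toList).map String.ofList).headD ""  -- n.split("/")[0]; split is never empty, so [0] is its head
    else n
  let counter := if st.2.contains base then st.2.modify base 0 (· + 1) else st.2.insert base 0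
  let new_name := base ++ "_" ++ PySem.Int.toStr (counter.getD base 0)
  (st.1.insert n new_name, counter)

def remap_dataset_names (topo_dataset_names : List String) : List (String × String) :=
  (topo_dataset_names.foldl remapStepA (PySem.Dict.empty, PySem.Dict.empty)).1.items

-- ===== PORT B =====
def remap_dataset_names_alt (topo_dataset_names : List String) : List (String × String) :=
  let bases := topo_dataset_names.map
    (fun n => ((PySem.Chars.splitOn n.toList "/".toList).map String.ofList).headD "")  -- n.split("/")[0]
  -- groups.setdefault(b, []).append(i): Dict.modify is exactly d[b] = d.get(b, []) + [i]
  let groups := (PySem.List.enumerate bases).foldl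
    (fun (g : PySem.Dict String (List Int)) p => g.modify p.2 [] (fun l => l ++ [p.1]))
    PySem.Dict.empty
  let suffix := groups.items.foldl
    (fun (s : PySem.Dict Int String) q =>
      (PySem.List.enumerate q.2).foldl
        (fun s r => s.insert r.2 (q.1 ++ "_" ++ PySem.Int.toStr r.1)) s)
    PySem.Dict.empty
  -- suffix[i]: the key is always present (every position was grouped), so get? never misses
  ((PySem.List.enumerate topo_dataset_names).foldl
    (fun (d : PySem.Dict String String) p => d.insert p.2 ((suffix.get? p.1).getD ""))
    PySem.Dict.empty).items

-- ===== PRECONDITION & SPEC =====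
def Spec_remap_dataset_names (topo_dataset_names : List String) (out : List (String × String)) : Prop := out = remap_dataset_names_alt topo_dataset_names
instance (topo_dataset_names : List String) (out : List (String × String)) : Decidable (Spec_remap_dataset_names topo_dataset_names out) := by unfold Spec_remap_dataset_names; infer_instance

-- ===== CLAIM (what is proved, stated in full; the proofs are below) =====
def Claim_equal_remap_dataset_names : Prop := ∀ (topo_dataset_names : List String), Dom_remap_dataset_names topo_dataset_names → Spec_remap_dataset_names topo_dataset_names (remap_dataset_names topo_dataset_names)

-- ===== LEMMAS AND PROOFS =====

-- proof-layer names for the pieces of B (definitionally equal to the lets in the port)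
def baseF (n : String) : String :=
  ((PySem.Chars.splitOn n.toList "/".toList).map String.ofList).headD ""

def basesF (names : List String) : List String := names.map baseF

def gstep (g : PySem.Dict String (List Int)) (p : Int × String) : PySem.Dict String (List Int) :=
  g.modify p.2 [] (fun l => l ++ [p.1])

def groupsF (names : List String) : PySem.Dict String (List Int) :=
  (PySem.List.enumerate (basesF names)).foldl gstep PySem.Dict.empty

def istep (b : String) (s : PySem.Dict Int String) (r : Int × Int) : PySem.Dict Int String :=
  s.insert r.2 (b ++ "_" ++ PySem.Int.toStr r.1)

def ostep (s : PySem.Dict Int String) (q : String × List Int) : PySem.Dict Int String :=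
  (PySem.List.enumerate q.2).foldl (istep q.1) s

def suffixF (names : List String) : PySem.Dict Int String :=
  (groupsF names).items.foldl ostep PySem.Dict.empty

def fstep (names : List String) (d : PySem.Dict String String) (p : Int × String) :
    PySem.Dict String String :=
  d.insert p.2 (((suffixF names).get? p.1).getD "")

lemma alt_eq (names : List String) :
    remap_dataset_names_alt names
      = ((PySem.List.enumerate names).foldl (fstep names) PySem.Dict.empty).items := rfl

-- the intermediate one-pass form: remap with a list of previously seen bases
def seenStep (st : PySem.Dict String String × List String) (n : String) :
    PySem.Dict String String × List String :=
  (st.1.insert n (baseF n ++ "_" ++ PySem.Int.toStr ((st.2.count (baseF n) : Int))),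
   st.2 ++ [baseF n])

-- splitOn finds no separator: the whole string is the single piece
lemma splitOn_go_no_sep (sep : List Char) (fuel : Nat) :
    ∀ (l cur : List Char) (acc : List (List Char)),
      (∀ i, ¬ sep <+: l.drop i) →
      PySem.Chars.splitOn.go sep fuel l cur acc = ((cur.reverse ++ l) :: acc).reverse := by
  induction fuel with
  | zero => intro l cur acc _; rfl
  | succ fuel ih =>
    intro l cur acc h
    cases l with
    | nil =>
      rw [PySem.Chars.splitOn.go]
      · simp
      · omega
    | cons c rest =>
      have h0 : sep.isPrefixOf (c :: rest) = false := by
        rw [Bool.eq_false_iff]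
        simpa [List.isPrefixOf_iff_prefix] using h 0
      rw [PySem.Chars.splitOn.go, h0]
      simp only [Bool.false_eq_true, if_false]
      rw [ih rest (c :: cur) acc (fun i => by simpa using h (i + 1))]
      simp

lemma splitOn_no_sep (s sep : List Char) (h : ¬ sep <:+: s) :
    PySem.Chars.splitOn s sep = [s] := by
  rw [PySem.Chars.splitOn, splitOn_go_no_sep]
  · simp
  · intro i hp
    exact h (hp.isInfix.trans (List.drop_suffix i s).isInfix)

-- A's branched base equals B's unconditional split head
lemma base_eq (n : String) :
    (if PySem.Str.isIn "/" n then baseF n else n) = baseF n := by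
  by_cases h : PySem.Str.isIn "/" n = true
  · rw [if_pos h]
  · rw [if_neg h]
    have hinf : ¬ ("/".toList <:+: n.toList) := fun hc => h ((PySem.Str.isIn_iff_infix _ _).mpr hc)
    rw [baseF, splitOn_no_sep _ _ hinf]
    simp [String.ofList_toList]

-- ===== A equals the seen-list one-pass form =====

-- invariant tying A's counter dict to the seen-bases list
def CounterInv (c : PySem.Dict String Int) (p : List String) : Prop :=
  ∀ b : String, c.contains b = (p.count b != 0) ∧
    c.getD b 0 = (if p.count b = 0 then 0 else (p.count b : Int) - 1)

lemma fold_eq (xs : List String) :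
    ∀ (r : PySem.Dict String String) (c : PySem.Dict String Int) (p : List String),
      CounterInv c p →
      (xs.foldl remapStepA (r, c)).1 = (xs.foldl seenStep (r, p)).1 := by
  induction xs with
  | nil => intro r c p _; rfl
  | cons n rest ih =>
    intro r c p hinv
    simp only [List.foldl_cons]
    have hcont := (hinv (baseF n)).1
    have hgetD := (hinv (baseF n)).2
    by_cases hzero : p.count (baseF n) = 0
    · -- base unseen: A inserts 0, the seen list counts 0
      have hc : c.contains (baseF n) = false := by simp [hcont, hzero]
      have hstep : remapStepA (r, c) n =
          (r.insert n (baseF n ++ "_" ++ PySem.Int.toStr 0), c.insert (baseF n) 0) := by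
        simp only [remapStepA]
        rw [show (((PySem.Chars.splitOn n.toList "/".toList).map String.ofList).headD "") = baseF n
          from rfl, base_eq n, hc]
        simp [PySem.Dict.getD_insert_self]
      rw [hstep]
      have hstepB : seenStep (r, p) n =
          (r.insert n (baseF n ++ "_" ++ PySem.Int.toStr 0), p ++ [baseF n]) := by
        simp only [seenStep, hzero, Nat.cast_zero]
      rw [hstepB]
      apply ih
      intro b
      by_cases hbb : b = baseF n
      · subst hbb
        constructor
        · simp [hzero]
        · simp [PySem.Dict.getD_insert_self, hzero]
      · have hne : (p ++ [baseF n]).count b = p.count b := by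
          simp [List.count_append, Ne.symm hbb]
        constructor
        · rw [PySem.Dict.contains_insert, hne, (hinv b).1]
          simp [hbb]
        · rw [PySem.Dict.getD_insert_of_ne c 0 0 hbb, hne, (hinv b).2]
    · -- base already seen: A bumps the counter, the seen list counts p.count base
      have hc : c.contains (baseF n) = true := by simp [hcont, hzero]
      have hval : (c.modify (baseF n) 0 (· + 1)).getD (baseF n) 0 = (p.count (baseF n) : Int) := by
        rw [PySem.Dict.getD_modify_self, hgetD, if_neg hzero]
        omega
      have hstep : remapStepA (r, c) n =
          (r.insert n (baseF n ++ "_" ++ PySem.Int.toStr ((p.count (baseF n) : Int))),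
           c.modify (baseF n) 0 (· + 1)) := by
        simp only [remapStepA]
        rw [show (((PySem.Chars.splitOn n.toList "/".toList).map String.ofList).headD "") = baseF n
          from rfl, base_eq n, hc]
        simp [hval]
      rw [hstep]
      have hstepB : seenStep (r, p) n =
          (r.insert n (baseF n ++ "_" ++ PySem.Int.toStr ((p.count (baseF n) : Int))),
           p ++ [baseF n]) := by
        simp only [seenStep]
      rw [hstepB]
      apply ih
      intro b
      by_cases hbb : b = baseF n
      · subst hbb
        have hcnt : (p ++ [baseF n]).count (baseF n) = p.count (baseF n) + 1 := by
          simp [List.count_append]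
        constructor
        · rw [PySem.Dict.contains_modify, hcnt]
          simp
        · rw [PySem.Dict.getD_modify_self, hgetD, if_neg hzero, hcnt, if_neg (by omega)]
          push_cast
          omega
      · have hne : (p ++ [baseF n]).count b = p.count b := by
          simp [List.count_append, Ne.symm hbb]
        constructor
        · rw [PySem.Dict.contains_modify, hne, (hinv b).1]
          simp [hbb]
        · rw [PySem.Dict.getD_modify_of_ne c 0 _ hbb, hne, (hinv b).2]

-- ===== the grouped positions list =====

-- positions (counted from a) at which bs carries base b
def idxL (b : String) (bs : List String) (a : Int) : List Int :=
  ((PySem.List.enumerate bs a).filter (fun p => p.2 == b)).map Prod.fst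

lemma idxL_cons (b c : String) (bs : List String) (a : Int) :
    idxL b (c :: bs) a = if c = b then a :: idxL b bs (a + 1) else idxL b bs (a + 1) := by
  simp only [idxL, PySem.List.enumerate_cons, List.filter_cons]
  by_cases h : c = b <;> simp [h]

lemma idxL_lb (b : String) (bs : List String) :
    ∀ (a x : Int), x ∈ idxL b bs a → a ≤ x := by
  induction bs with
  | nil => intro a x hx; simp [idxL] at hx
  | cons c bs ih =>
    intro a x hx
    rw [idxL_cons] at hx
    by_cases h : c = b
    · rw [if_pos h, List.mem_cons] at hx
      rcases hx with rfl | hx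
      · omega
      · have := ih (a + 1) x hx; omega
    · rw [if_neg h] at hx
      have := ih (a + 1) x hx; omega

lemma idxL_nodup (b : String) (bs : List String) : ∀ a : Int, (idxL b bs a).Nodup := by
  induction bs with
  | nil => intro a; simp [idxL]
  | cons c bs ih =>
    intro a
    rw [idxL_cons]
    by_cases h : c = b
    · rw [if_pos h]
      refine List.Nodup.cons (fun hmem => ?_) (ih (a + 1))
      have := idxL_lb b bs (a + 1) a hmem; omega
    · rw [if_neg h]; exact ih (a + 1)

lemma mem_idxL_iff (b : String) (bs : List String) :
    ∀ (a : Int) (i : Nat) (hi : i < bs.length), ((a + i) ∈ idxL b bs a ↔ b = bs[i]) := by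
  induction bs with
  | nil => intro a i hi; simp at hi
  | cons c bs ih =>
    intro a i hi
    rw [idxL_cons]
    cases i with
    | zero =>
      simp only [Nat.cast_zero, add_zero, List.getElem_cons_zero]
      by_cases h : c = b
      · simp [h]
      · rw [if_neg h]
        constructor
        · intro hmem; have := idxL_lb b bs (a + 1) a hmem; omega
        · intro hb; exact absurd hb.symm h
    | succ i =>
      have hkey : a + ((i : Int) + 1) = (a + 1) + (i : Int) := by ring
      have hlt : i < bs.length := by simpa using hi
      by_cases h : c = b
      · rw [if_pos h, List.mem_cons]
        push_cast
        rw [hkey]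
        constructor
        · intro hx
          rcases hx with heq | hx
          · exfalso; omega
          · exact (by simpa using (ih (a + 1) i hlt).mp hx)
        · intro hb
          exact Or.inr ((ih (a + 1) i hlt).mpr (by simpa using hb))
      · rw [if_neg h]
        push_cast
        rw [hkey]
        constructor
        · intro hx; exact (by simpa using (ih (a + 1) i hlt).mp hx)
        · intro hb; exact (ih (a + 1) i hlt).mpr (by simpa using hb)

lemma idxOf_idxL (b : String) (bs : List String) :
    ∀ (a : Int) (i : Nat) (hi : i < bs.length), b = bs[i] →
      (idxL b bs a).idxOf (a + i) = (bs.take i).count b := by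
  induction bs with
  | nil => intro a i hi; simp at hi
  | cons c bs ih =>
    intro a i hi hb
    rw [idxL_cons]
    cases i with
    | zero =>
      have hc : c = b := by simpa using hb.symm
      simp [if_pos hc]
    | succ i =>
      have hkey : a + ((i : Int) + 1) = (a + 1) + (i : Int) := by ring
      have hlt : i < bs.length := by simpa using hi
      have hb' : b = bs[i] := by simpa using hb
      by_cases h : c = b
      · rw [if_pos h]
        push_cast
        rw [hkey]
        have hne : (a + 1) + (i : Int) ≠ a := by omega
        rw [List.idxOf_cons_ne _ (by simpa using (Ne.symm hne)), ih (a + 1) i hlt hb']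
        simp [h]
      · rw [if_neg h]
        push_cast
        rw [hkey, ih (a + 1) i hlt hb']
        simp [h]

-- ===== phase 1: the groups dict holds exactly the position lists =====

lemma groups_get? (bs : List String) :
    ∀ (a : Int) (g : PySem.Dict String (List Int)) (b : String),
      ((PySem.List.enumerate bs a).foldl gstep g).get? b
        = if b ∈ bs ∨ (g.get? b).isSome then some ((g.get? b).getD [] ++ idxL b bs a)
          else none := by
  induction bs with
  | nil =>
    intro a g b
    by_cases h : (g.get? b).isSome
    · rcases Option.isSome_iff_exists.mp h with ⟨v, hv⟩
      simp [idxL, hv]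
    · simp only [PySem.List.enumerate, List.not_mem_nil, false_or]
      rw [if_neg (by simpa using h)]
      simpa using Option.not_isSome_iff_eq_none.mp (by simpa using h)
  | cons c bs ih =>
    intro a g b
    rw [PySem.List.enumerate_cons, List.foldl_cons, ih]
    have hmod : gstep g (a, c) = g.insert c (g.getD c [] ++ [a]) := rfl
    by_cases hcb : b = c
    · subst hcb
      rw [hmod]
      have hget : (g.insert b (g.getD b [] ++ [a])).get? b = some (g.getD b [] ++ [a]) :=
        PySem.Dict.get?_insert_self g b _
      rw [if_pos (Or.inr (by simp [hget])), hget, if_pos (Or.inl (List.mem_cons_self))]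
      rw [idxL_cons, if_pos rfl]
      cases hgb : g.get? b with
      | none => simp [PySem.Dict.getD, hgb]
      | some l => simp [PySem.Dict.getD, hgb]
    · rw [hmod, PySem.Dict.get?_insert_of_ne g _ hcb]
      rw [idxL_cons, if_neg (show ¬ (c = b) from fun hh => hcb hh.symm)]
      by_cases hmem : b ∈ bs ∨ (g.get? b).isSome
      · rw [if_pos hmem, if_pos (show b ∈ c :: bs ∨ (g.get? b).isSome by
          rcases hmem with h | h
          · exact Or.inl (List.mem_cons_of_mem _ h)
          · exact Or.inr h)]
      · rw [if_neg hmem, if_neg (show ¬ (b ∈ c :: bs ∨ (g.get? b).isSome = true) by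
          intro hh
          rcases hh with hh | hh
          · rcases List.mem_cons.mp hh with rfl | hh2
            · exact hcb rfl
            · exact hmem (Or.inl hh2)
          · exact hmem (Or.inr hh))]

lemma groups_keys_nodup (l : List (Int × String)) :
    ∀ g : PySem.Dict String (List Int), g.keys.Nodup → (l.foldl gstep g).keys.Nodup := by
  induction l with
  | nil => intro g hg; exact hg
  | cons p l ih =>
    intro g hg
    rw [List.foldl_cons]
    exact ih _ (PySem.Dict.nodup_keys_insert g p.2 _ hg)

-- ===== phase 2: the suffix dict =====

lemma inner_get (b : String) (idxs : List Int) (hnd : idxs.Nodup) :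
    ∀ (a : Int) (s : PySem.Dict Int String) (x : Int),
      ((PySem.List.enumerate idxs a).foldl (istep b) s).get? x
        = if x ∈ idxs then some (b ++ "_" ++ PySem.Int.toStr (a + idxs.idxOf x))
          else s.get? x := by
  induction idxs with
  | nil => intro a s x; simp [PySem.List.enumerate]
  | cons j rest ih =>
    intro a s x
    have hnd' : rest.Nodup := hnd.of_cons
    rw [PySem.List.enumerate_cons, List.foldl_cons, ih hnd']
    by_cases hx : x = j
    · subst hx
      have hnot : x ∉ rest := (List.nodup_cons.mp hnd).1
      rw [if_neg hnot, if_pos (List.mem_cons_self)]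
      have : istep b s (a, x) = s.insert x (b ++ "_" ++ PySem.Int.toStr a) := rfl
      rw [this, PySem.Dict.get?_insert_self]
      simp
    · have : istep b s (a, j) = s.insert j (b ++ "_" ++ PySem.Int.toStr a) := rfl
      rw [this]
      by_cases hmem : x ∈ rest
      · rw [if_pos hmem, if_pos (List.mem_cons_of_mem _ hmem)]
        rw [List.idxOf_cons_ne _ (by simpa using Ne.symm hx)]
        have harg : (a : Int) + 1 + (rest.idxOf x : Int) = a + ((rest.idxOf x + 1 : Nat) : Int) := by
          push_cast; omega
        rw [harg]
      · rw [if_neg hmem, if_neg (by simp [hx, hmem]), PySem.Dict.get?_insert_of_ne s _ hx]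

lemma outer_fold (bs : List String) (i : Nat) (hi : i < bs.length) :
    ∀ (J : List (String × List Int)) (s : PySem.Dict Int String),
      (∀ q ∈ J, q.2 = idxL q.1 bs 0) →
      (J.foldl ostep s).get? (i : Int)
        = if bs[i] ∈ J.map Prod.fst
            then some (bs[i] ++ "_" ++ PySem.Int.toStr ((bs.take i).count bs[i]))
            else s.get? (i : Int) := by
  intro J
  induction J with
  | nil => intro s _; simp
  | cons q J ih =>
    intro s hq
    rw [List.foldl_cons]
    have hq2 : q.2 = idxL q.1 bs 0 := hq q List.mem_cons_self
    have hmemiff : ((i : Int) ∈ idxL q.1 bs 0) ↔ q.1 = bs[i] := by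
      have := mem_idxL_iff q.1 bs 0 i hi
      simpa using this
    have hstep : ostep s q = (PySem.List.enumerate q.2).foldl (istep q.1) s := rfl
    rw [ih _ (fun r hr => hq r (List.mem_cons_of_mem _ hr))]
    by_cases hb : q.1 = bs[i]
    · have hmemtop : bs[i] ∈ (q :: J).map Prod.fst := by simp [← hb]
      rw [if_pos hmemtop]
      by_cases hmem : bs[i] ∈ J.map Prod.fst
      · rw [if_pos hmem]
      · rw [if_neg hmem, hstep, inner_get q.1 q.2 (by rw [hq2]; exact idxL_nodup _ _ _)]
        rw [if_pos (by rw [hq2]; exact hmemiff.mpr hb)]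
        have hidx : q.2.idxOf (i : Int) = (bs.take i).count bs[i] := by
          rw [hq2, hb]
          have := idxOf_idxL bs[i] bs 0 i hi rfl
          simpa using this
        rw [hb, hidx]
        simp
    · have hiff2 : (bs[i] ∈ (q :: J).map Prod.fst) ↔ bs[i] ∈ J.map Prod.fst := by
        rw [List.map_cons, List.mem_cons]
        constructor
        · intro hh
          rcases hh with hh | hh
          · exact absurd hh.symm hb
          · exact hh
        · exact Or.inr
      by_cases hmem : bs[i] ∈ J.map Prod.fst
      · rw [if_pos hmem, if_pos (hiff2.mpr hmem)]
      · rw [if_neg hmem, if_neg (fun hh => hmem (hiff2.mp hh)), hstep,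
          inner_get q.1 q.2 (by rw [hq2]; exact idxL_nodup _ _ _)]
        rw [if_neg (by rw [hq2]; exact fun hh => hb (hmemiff.mp hh))]

lemma suffix_get (names : List String) (i : Nat) (hi : i < (basesF names).length) :
    (suffixF names).get? (i : Int)
      = some ((basesF names)[i] ++ "_"
          ++ PySem.Int.toStr (((basesF names).take i).count (basesF names)[i])) := by
  have hkeys : (groupsF names).keys.Nodup := by
    apply groups_keys_nodup
    simp [PySem.Dict.keys_empty]
  have hget : ∀ b : String, (groupsF names).get? b
      = if b ∈ basesF names then some (idxL b (basesF names) 0) else none := by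
    intro b
    rw [groupsF, groups_get? (basesF names) 0 PySem.Dict.empty b]
    have hemp : (PySem.Dict.empty : PySem.Dict String (List Int)).get? b = none := rfl
    rw [hemp]
    simp
  have hitems : ∀ q ∈ (groupsF names).items, q.2 = idxL q.1 (basesF names) 0 := by
    intro q hq
    have := (PySem.Dict.get?_eq_some_iff_mem_items (groupsF names) q.1 q.2 hkeys).mpr
      (by cases q; exact hq)
    rw [hget q.1] at this
    by_cases hb : q.1 ∈ basesF names
    · rw [if_pos hb] at this
      exact (Option.some_inj.mp this).symm
    · rw [if_neg hb] at this
      cases this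
  have hmem : (basesF names)[i] ∈ (groupsF names).items.map Prod.fst := by
    have hsome : (groupsF names).get? (basesF names)[i]
        = some (idxL (basesF names)[i] (basesF names) 0) := by
      rw [hget]; rw [if_pos (List.getElem_mem hi)]
    have hpair := (PySem.Dict.get?_eq_some_iff_mem_items (groupsF names) _ _ hkeys).mp hsome
    exact List.mem_map.mpr ⟨_, hpair, rfl⟩
  rw [suffixF, outer_fold (basesF names) i hi _ _ hitems, if_pos hmem]

-- ===== phase 3: the final dict equals the seen-list fold =====

lemma final_fold (names : List String) :
    ∀ (rest pre : List String) (r : PySem.Dict String String), names = pre ++ rest →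
      (PySem.List.enumerate rest (pre.length : Int)).foldl (fstep names) r
        = (rest.foldl seenStep (r, pre.map baseF)).1 := by
  intro rest
  induction rest with
  | nil => intro pre r _; rfl
  | cons n rest ih =>
    intro pre r hnames
    rw [PySem.List.enumerate_cons, List.foldl_cons, List.foldl_cons]
    have hlen : pre.length < (basesF names).length := by
      simp [basesF, hnames]
    have hgetb : (basesF names)[pre.length]'hlen = baseF n := by
      simp [basesF, hnames]
    have htake : (basesF names).take pre.length = pre.map baseF := by
      simp [basesF, hnames, List.take_left']
    have hsf : (suffixF names).get? (pre.length : Int)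
        = some (baseF n ++ "_" ++ PySem.Int.toStr ((pre.map baseF).count (baseF n))) := by
      rw [suffix_get names pre.length hlen, hgetb, htake]
    have hfs : fstep names r ((pre.length : Int), n)
        = r.insert n (baseF n ++ "_" ++ PySem.Int.toStr ((pre.map baseF).count (baseF n))) := by
      rw [fstep, hsf]; rfl
    have hss : seenStep (r, pre.map baseF) n
        = (r.insert n (baseF n ++ "_" ++ PySem.Int.toStr ((pre.map baseF).count (baseF n))),
           pre.map baseF ++ [baseF n]) := by
      rw [seenStep]
    rw [hfs, hss]
    have hlen2 : ((pre.length : Int) + 1) = (((pre ++ [n]).length : Nat) : Int) := by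
      simp
    have hmap2 : pre.map baseF ++ [baseF n] = (pre ++ [n]).map baseF := by
      simp
    rw [hlen2, hmap2]
    exact ih (pre ++ [n]) _ (by simp [hnames])

-- ===== VERDICT (by name: the statement is the Claim_ definition above) =====
theorem remap_dataset_names_spec : Claim_equal_remap_dataset_names := by
  intro xs _
  unfold Spec_remap_dataset_names
  rw [alt_eq]
  have hA : remap_dataset_names xs = (xs.foldl seenStep (PySem.Dict.empty, [])).1.items := by
    unfold remap_dataset_names
    rw [fold_eq]
    intro b
    constructor <;> rfl
  rw [hA]
  have := final_fold xs xs [] PySem.Dict.empty (by simp)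
  simp only [List.length_nil, Nat.cast_zero, List.map_nil] at this
  rw [this]
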